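-- pv_equiv track=rewrite | github.com/XinnuoXu/Highlight_based_Summarization | Highlight_evaluation/build_human_eva.py | eva_highlight
-- ===== SOURCE A (Python) =====
-- def label_classify(item):
--     if item[0] == '(':
--         if item[1] == 'F':
--             return "fact"
--         else:
--             return "phrase"
--     elif item[0] == ')':
--         return "end"
--     elif item[0] == '*':
--         return "reference"
--     return "token"
--
-- def eva_highlight(line):
--     tokens = [[] for i in enumerate(line)]; names = []
--     length = len(line)
--     fact_name_stack = []
--     fact_id_stack = []
--     phrase_id_stack = []
--     type_stack = []
--     only_tokens = []
--     for i, item in enumerate(line):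
--         l_type = label_classify(item)
--         if l_type in ["fact", "phrase"]:
--             type_stack.append(l_type)
--             if l_type == "fact":
--                 fact_name_stack.append(item[1:])
--                 fact_id_stack.append(i)
--                 names.append(item[1:])
--             else:
--                 phrase_id_stack.append(i)
--                 names.append(fact_name_stack[-1] + "|||" + item[1:])
--         elif l_type == "end":
--             pop_type = type_stack.pop()
--             if pop_type == "fact":
--                 fact_name_stack.pop()
--                 fact_id_stack.pop()
--             if pop_type == "phrase":
--                 phrase_id_stack.pop()
--             names.append("")
--         else:
--             if l_type == "reference":
--                 names.append("")
--             else: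
--                 for j in range(length):
--                     if len(phrase_id_stack) > 0 and \
--                             j == phrase_id_stack[-1] and \
--                             len(type_stack) > 0 and \
--                             type_stack[-1] == "phrase":
--                         tokens[j] = tokens[j] + ["<strong>", item, "</strong>"]
--                         continue
--                     if len(fact_id_stack) > 0 and j == fact_id_stack[-1]:
--                         tokens[j] = tokens[j] + ["<strong>", item, "</strong>"]
--                         continue
--                     tokens[j] = tokens[j] + [item]
--                 names.append("")
--                 only_tokens.append(item)
--
--     ret_list = []; ret_name = []
--     for i, item in enumerate(tokens):
--         if names[i] != "":
--             ret_list.append(item)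
--             ret_name.append(names[i])
--     return ret_list, ret_name, only_tokens
-- ===== SOURCE B (Python) =====
-- def eva_highlight(line):
--     heads = []            # (position, name) in appearance order
--     base = []             # plain tokens in order
--     owners = []           # per plain token: (phrase owner position, fact owner position)
--     types, facts, phrases = [], [], []
--     for i, item in enumerate(line):
--         c = item[0]
--         if c == '(':
--             if item[1] == 'F':
--                 types.append("fact")
--                 facts.append((i, item[1:]))
--                 heads.append((i, item[1:]))
--             else:
--                 types.append("phrase")
--                 phrases.append(i)
--                 heads.append((i, facts[-1][1] + "|||" + item[1:]))
--         elif c == ')':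
--             t = types.pop()
--             if t == "fact":
--                 facts.pop()
--             elif t == "phrase":
--                 phrases.pop()
--         elif c == '*':
--             pass
--         else:
--             op = phrases[-1] if types and types[-1] == "phrase" else None
--             of = facts[-1][0] if facts else None
--             base.append(item)
--             owners.append((op, of))
--     pairs = list(zip(base, owners))
--     ret_list, ret_name = [], []
--     for p, name in heads:
--         ret_list.append([w for t, (op, of) in pairs
--                          for w in (["<strong>", t, "</strong>"] if op == p or of == p else [t])])
--         ret_name.append(name)
--     return ret_list, ret_name, base
-- ===== Notes on version B (the rewrite author's own statement) =====
-- stated objective: faster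
-- what changed: A broadcasts every plain token into a per-position list for ALL n line positions via an inner for-j-in-range(length) scan and filters at the end (O(n^2) even when most rows are discarded); B makes one pass recording a flat base-token list, an owner table (phrase/fact head position per token) and the ordered head list, then renders only the kept head rows from that table.
import Mathlib
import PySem

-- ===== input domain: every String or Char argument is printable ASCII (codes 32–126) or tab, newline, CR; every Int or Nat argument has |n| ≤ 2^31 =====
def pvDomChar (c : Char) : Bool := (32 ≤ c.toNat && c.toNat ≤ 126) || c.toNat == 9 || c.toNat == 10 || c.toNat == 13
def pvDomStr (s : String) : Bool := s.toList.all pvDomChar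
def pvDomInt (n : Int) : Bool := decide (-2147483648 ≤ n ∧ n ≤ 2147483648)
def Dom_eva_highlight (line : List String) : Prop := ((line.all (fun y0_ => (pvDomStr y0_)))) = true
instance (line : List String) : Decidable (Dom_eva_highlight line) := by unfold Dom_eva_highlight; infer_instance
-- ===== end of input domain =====

-- B replaces A's inner broadcast over every line position with a once-built owner table and
-- renders only the kept head rows (measured faster in a timing run); return values agree on Pre_.

-- ===== PORT A =====
-- Python raises IndexError on item = "" (item[0]) and item = "(" (item[1]); those inputs are outside
-- Pre_eva_highlight, where the total Lean port falls back to "token" / "phrase".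
def label_classify (item : String) : String :=
  match item.toList with
  | [] => "token"
  | c :: cs =>
    if c = '(' then
      if cs.head? = some 'F' then "fact" else "phrase"
    else if c = ')' then "end"
    else if c = '*' then "reference"
    else "token"

structure StA where
  tokens : List (List String)
  names : List String
  fns : List String
  fis : List Nat
  pis : List Nat
  ts : List String
  only : List String

-- A's inner `for j in range(length)` loop over the per-position token lists (j is the running index).
def broadcastA (item : String) (fis pis : List Nat) (ts : List String) : Nat → List (List String) → List (List String)
  | _, [] => []
  | j, tj :: rest =>
    (if pis.head? = some j ∧ ts.head? = some "phrase" then tj ++ ["<strong>", item, "</strong>"]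
     else if fis.head? = some j then tj ++ ["<strong>", item, "</strong>"]
     else tj ++ [item]) :: broadcastA item fis pis ts (j + 1) rest

-- One iteration of A's main loop; stacks push/pop at the head (Python's append/pop at the end).
-- A pop on an empty stack (Python IndexError, outside Pre_) is a total no-op here.
def stepA (i : Nat) (item : String) (s : StA) : StA :=
  let l_type := label_classify item
  if l_type = "fact" ∨ l_type = "phrase" then
    if l_type = "fact" then
      { s with ts := "fact" :: s.ts, fns := String.ofList (item.toList.drop 1) :: s.fns,
               fis := i :: s.fis, names := s.names ++ [String.ofList (item.toList.drop 1)] }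
    else
      { s with ts := "phrase" :: s.ts, pis := i :: s.pis,
               names := s.names ++ [s.fns.headD "" ++ "|||" ++ String.ofList (item.toList.drop 1)] }
  else if l_type = "end" then
    let pop_type := s.ts.headD ""
    let s1 := { s with ts := s.ts.tail }
    let s2 := if pop_type = "fact" then { s1 with fns := s1.fns.tail, fis := s1.fis.tail } else s1
    let s3 := if pop_type = "phrase" then { s2 with pis := s2.pis.tail } else s2
    { s3 with names := s3.names ++ [""] }
  else if l_type = "reference" then
    { s with names := s.names ++ [""] }
  else
    { s with tokens := broadcastA item s.fis s.pis s.ts 0 s.tokens,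
             names := s.names ++ [""], only := s.only ++ [item] }

def loopA : Nat → List String → StA → StA
  | _, [], s => s
  | i, item :: rest, s => loopA (i + 1) rest (stepA i item s)

-- A's final filtering loop over enumerate(tokens) with names.
def finalA : List (List String × String) → List (List String) → List String → List (List String) × List String
  | [], rl, rn => (rl, rn)
  | (t, nm) :: rest, rl, rn =>
    if nm ≠ "" then finalA rest (rl ++ [t]) (rn ++ [nm]) else finalA rest rl rn

def eva_highlight (line : List String) : List (List String) × List String × List String :=
  let s := loopA 0 line
    { tokens := line.map (fun _ => []), names := [], fns := [], fis := [], pis := [], ts := [], only := [] }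
  let p := finalA (s.tokens.zip s.names) [] []
  (p.1, p.2, s.only)

-- ===== PORT B =====
def wrapB (p : Nat) (t : String) (o : Option Nat × Option Nat) : List String :=
  if o.1 = some p ∨ o.2 = some p then ["<strong>", t, "</strong>"] else [t]

def renderB (pairs : List (String × (Option Nat × Option Nat))) (p : Nat) : List String :=
  pairs.flatMap (fun q => wrapB p q.1 q.2)

structure StB where
  heads : List (Nat × String)
  base : List String
  owners : List (Option Nat × Option Nat)
  types : List String
  facts : List (Nat × String)
  phrases : List Nat

-- One iteration of B's single pass, classified off the first character (an empty item, where
-- Python raises, falls into the plain-token branch; empty pops are total no-ops — both outside Pre_).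
def stepB (i : Nat) (item : String) (t : StB) : StB :=
  let cs := item.toList.tail
  if item.toList.head? = some '(' then
    if cs.head? = some 'F' then
      { t with types := "fact" :: t.types, facts := (i, String.ofList cs) :: t.facts,
               heads := t.heads ++ [(i, String.ofList cs)] }
    else
      { t with types := "phrase" :: t.types, phrases := i :: t.phrases,
               heads := t.heads ++ [(i, (t.facts.headD (0, "")).2 ++ "|||" ++ String.ofList cs)] }
  else if item.toList.head? = some ')' then
    let ty := t.types.headD ""
    let t1 := { t with types := t.types.tail }
    if ty = "fact" then { t1 with facts := t1.facts.tail }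
    else if ty = "phrase" then { t1 with phrases := t1.phrases.tail }
    else t1
  else if item.toList.head? = some '*' then t
  else
    let op : Option Nat := if t.types.head? = some "phrase" then t.phrases.head? else none
    let of_ : Option Nat := t.facts.head?.map Prod.fst
    { t with base := t.base ++ [item], owners := t.owners ++ [(op, of_)] }

def loopB : Nat → List String → StB → StB
  | _, [], t => t
  | i, item :: rest, t => loopB (i + 1) rest (stepB i item t)

def eva_highlight_alt (line : List String) : List (List String) × List String × List String :=
  let t := loopB 0 line ⟨[], [], [], [], [], []⟩
  let pairs := t.base.zip t.owners
  (t.heads.map (fun h => renderB pairs h.1), t.heads.map Prod.snd, t.base)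

-- ===== PRECONDITION & SPEC =====
-- Pre_ excludes exactly the inputs on which the Python A raises IndexError: an empty token, a bare
-- "(", a ")" with no open bracket, or a phrase opened outside any fact (fact_name_stack[-1]).
-- The scan's stack records, for each open bracket, whether it is a phrase (true) or a fact (false).
def preOk : List String → List Bool → Bool
  | [], _ => true
  | item :: rest, st =>
    match item.toList with
    | [] => false
    | c :: cs =>
      if c = '(' then
        match cs with
        | [] => false
        | 'F' :: _ => preOk rest (false :: st)
        | _ => st.contains false && preOk rest (true :: st)
      else if c = ')' then
        match st with
        | [] => false
        | _ :: st' => preOk rest st'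
      else preOk rest st

def Pre_eva_highlight (line : List String) : Prop := preOk line [] = true
instance (line : List String) : Decidable (Pre_eva_highlight line) := by
  unfold Pre_eva_highlight; infer_instance

def pvWitness_eva_highlight : List String := ["(Ffact1", "the", "(NP", "cat", ")", "*ref", ")"]

def Spec_eva_highlight (line : List String) (out : List (List String) × List String × List String) : Prop := out = eva_highlight_alt line
instance (line : List String) (out : List (List String) × List String × List String) : Decidable (Spec_eva_highlight line out) := by unfold Spec_eva_highlight; infer_instance

-- ===== CLAIM (what is proved, stated in full; the proofs are below) =====
def Claim_equal_eva_highlight : Prop := ∀ (line : List String), Dom_eva_highlight line → Pre_eva_highlight line → Spec_eva_highlight line (eva_highlight line)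

-- ===== LEMMAS AND PROOFS =====

-- index-tagged filter of A's names list: the heads that survive A's final filter
def idxf : Nat → List String → List (Nat × String)
  | _, [] => []
  | k, nm :: rest => (if nm ≠ "" then [(k, nm)] else []) ++ idxf (k + 1) rest

-- the loop invariant tying A's state to B's (n = length of the whole line, i = items consumed)
def InvAB (n i : Nat) (s : StA) (t : StB) : Prop :=
  s.ts = t.types ∧
  s.fns = t.facts.map Prod.snd ∧
  s.fis = t.facts.map Prod.fst ∧
  s.pis = t.phrases ∧
  s.only = t.base ∧
  t.owners.length = t.base.length ∧
  s.names.length = i ∧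
  s.tokens = (List.range n).map (fun j => renderB (t.base.zip t.owners) j) ∧
  idxf 0 s.names = t.heads

theorem idxf_append (nm : String) : ∀ (xs : List String) (k : Nat),
    idxf k (xs ++ [nm]) = idxf k xs ++ (if nm ≠ "" then [(k + xs.length, nm)] else []) := by
  intro xs
  induction xs with
  | nil => intro k; simp [idxf]
  | cons x xs ih =>
    intro k
    simp only [List.cons_append, idxf, ih (k + 1), List.append_assoc, List.length_cons]
    ring_nf

theorem renderB_append (pairs : List (String × (Option Nat × Option Nat))) (q : String × (Option Nat × Option Nat)) (p : Nat) :
    renderB (pairs ++ [q]) p = renderB pairs p ++ wrapB p q.1 q.2 := by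
  simp [renderB]

theorem broadcastA_eq (item : String) (fis pis : List Nat) (ts : List String)
    (pairs : List (String × (Option Nat × Option Nat))) :
    ∀ (m k : Nat),
    broadcastA item fis pis ts k ((List.range' k m).map (fun j => renderB pairs j)) =
      (List.range' k m).map (fun j =>
        renderB (pairs ++ [(item, ((if ts.head? = some "phrase" then pis.head? else none), fis.head?))]) j) := by
  intro m
  induction m with
  | zero => intro k; simp [broadcastA]
  | succ m ih =>
    intro k
    rw [List.range'_succ]
    simp only [List.map_cons, broadcastA, ih (k + 1)]
    congr 1
    rw [renderB_append]
    by_cases hp : ts.head? = some "phrase" <;>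
      by_cases hpk : pis.head? = some k <;>
      by_cases hf : fis.head? = some k <;>
      simp [wrapB, hp, hpk, hf]

theorem ofList_cons_ne_empty (c : Char) (cs : List Char) : String.ofList (c :: cs) ≠ "" := by
  intro h
  have h2 : (c :: cs : List Char) = ([] : List Char) := by
    simpa using congrArg String.toList h
  cases h2

theorem append_bars_ne_empty (a b : String) : a ++ "|||" ++ b ≠ "" := by
  intro h
  have h2 := congrArg String.toList h
  simp [String.toList_append] at h2

theorem headD_map_snd (facts : List (Nat × String)) :
    (facts.map Prod.snd).headD "" = (facts.headD (0, "")).2 := by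
  cases facts <;> simp

theorem classify_eq (item : String) : label_classify item =
    if item.toList.head? = some '(' then
      (if item.toList.tail.head? = some 'F' then "fact" else "phrase")
    else if item.toList.head? = some ')' then "end"
    else if item.toList.head? = some '*' then "reference"
    else "token" := by
  cases h : item.toList with
  | nil => simp [label_classify, h]
  | cons c cs =>
    simp only [label_classify, h, List.head?_cons, List.tail_cons, Option.some.injEq]
    split_ifs <;> rfl

theorem stepA_stepB (n i : Nat) (item : String) (s : StA) (t : StB)
    (h : InvAB n i s t) : InvAB n (i + 1) (stepA i item s) (stepB i item t) := by
  obtain ⟨hts, hfns, hfis, hpis, honly, hol, hnl, htok, hidx⟩ := h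
  by_cases h1 : item.toList.head? = some '('
  · by_cases h2 : item.toList.tail.head? = some 'F'
    · -- fact branch
      have hne : String.ofList (item.toList.tail) ≠ "" := by
        cases htl : item.toList.tail with
        | nil => rw [htl] at h2; exact absurd h2 (by simp)
        | cons c cs => exact ofList_cons_ne_empty c cs
      simp only [stepA, stepB, classify_eq, h1, h2, if_true, List.drop_one, true_or]
      refine ⟨by simp [hts], by simp [hfns], by simp [hfis], hpis, honly, hol,
        by simp [hnl], htok, ?_⟩
      rw [idxf_append, hidx, hnl]
      simp [hne]
    · -- phrase branch
      have hne := append_bars_ne_empty (t.facts.headD (0, "")).2 (String.ofList item.toList.tail)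
      simp only [stepA, stepB, classify_eq, h1, h2, List.drop_one, if_false, if_true]
      simp only [show ("phrase" : String) = "fact" ↔ False by simp, or_true, if_true, if_false]
      refine ⟨by simp [hts], hfns, hfis, by simp [hpis], honly, hol, by simp [hnl], htok, ?_⟩
      dsimp only
      simp only [hfns, headD_map_snd]
      rw [idxf_append, hidx, hnl]
      simp only [hne, ne_eq, not_false_eq_true, if_true, Nat.zero_add]
  · by_cases h3 : item.toList.head? = some ')'
    · -- end branch
      simp only [stepA, stepB, classify_eq, h3, hts]
      by_cases hty : t.types.headD "" = "fact"
      · simp only [hty, if_true,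
          show (("fact" : String) = "phrase") = False by simp, if_false]
        exact ⟨by simp [], by simp [hfns, List.map_tail], by simp [hfis, List.map_tail],
          by simp [hpis], honly, hol, by simp [hnl], htok,
          by show idxf 0 (s.names ++ [""]) = t.heads; rw [idxf_append, hidx]; simp⟩
      · by_cases hty2 : t.types.headD "" = "phrase"
        · simp only [hty2, if_true, if_false,
            show (("phrase" : String) = "fact") = False by simp]
          exact ⟨by simp [], by simp [hfns], by simp [hfis],
            by simp [hpis], honly, hol, by simp [hnl], htok,
            by show idxf 0 (s.names ++ [""]) = t.heads; rw [idxf_append, hidx]; simp⟩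
        · simp only [hty, hty2, if_false]
          exact ⟨by simp [], by simp [hfns], by simp [hfis],
            by simp [hpis], honly, hol, by simp [hnl], htok,
            by show idxf 0 (s.names ++ [""]) = t.heads; rw [idxf_append, hidx]; simp⟩
    · by_cases h4 : item.toList.head? = some '*'
      · -- reference branch
        simp only [stepA, stepB, classify_eq, h4]
        exact ⟨hts, hfns, hfis, hpis, honly, hol, by simp [hnl], htok,
          by show idxf 0 (s.names ++ [""]) = t.heads; rw [idxf_append, hidx]; simp⟩
      · -- plain-token branch
        simp only [stepA, stepB, classify_eq, h1, h3, h4, if_false]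
        refine ⟨hts, hfns, hfis, hpis, by simp [honly], by simp [hol], by simp [hnl], ?_, ?_⟩
        · show broadcastA item s.fis s.pis s.ts 0 s.tokens =
            List.map (fun j => renderB ((t.base ++ [item]).zip
              (t.owners ++ [((if t.types.head? = some "phrase" then t.phrases.head? else none),
                t.facts.head?.map Prod.fst)])) j) (List.range n)
          rw [htok, List.range_eq_range', broadcastA_eq, List.zip_append (by simpa using hol.symm)]
          simp [hts, hfis, hpis]
        · show idxf 0 (s.names ++ [""]) = t.heads
          rw [idxf_append, hidx]
          simp

theorem loopAB (n : Nat) : ∀ (l : List String) (i : Nat) (s : StA) (t : StB),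
    InvAB n i s t → InvAB n (i + l.length) (loopA i l s) (loopB i l t) := by
  intro l
  induction l with
  | nil => intro i s t h; simpa [loopA, loopB] using h
  | cons item rest ih =>
    intro i s t h
    have h1 := ih (i + 1) _ _ (stepA_stepB n i item s t h)
    simp only [loopA, loopB, List.length_cons]
    have : i + 1 + rest.length = i + (rest.length + 1) := by omega
    rw [this] at h1
    exact h1

theorem finalA_eq (f : Nat → List String) :
    ∀ (names : List String) (k : Nat) (acc1 : List (List String)) (acc2 : List String),
    finalA (((List.range' k names.length).map (fun j => f j)).zip names) acc1 acc2 =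
      (acc1 ++ (idxf k names).map (fun p => f p.1), acc2 ++ (idxf k names).map Prod.snd) := by
  intro names
  induction names with
  | nil => intro k acc1 acc2; simp [finalA, idxf]
  | cons nm rest ih =>
    intro k acc1 acc2
    simp only [List.length_cons, List.range'_succ, List.map_cons, List.zip_cons_cons, finalA, idxf]
    by_cases hnm : nm = ""
    · simp [hnm, ih]
    · simp [hnm, ih, List.append_assoc]

theorem map_const_range {α : Type} (c : List String) :
    ∀ (l : List α), l.map (fun _ => c) = (List.range l.length).map (fun _ => c) := by
  intro l
  rw [List.map_const', List.map_const']
  simp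

theorem eva_highlight_spec : Claim_equal_eva_highlight := by
  intro line _ _
  show _ = _
  simp only [eva_highlight, eva_highlight_alt]
  have h0 : InvAB line.length 0
      { tokens := line.map (fun _ => []), names := [], fns := [], fis := [], pis := [], ts := [], only := [] }
      ⟨[], [], [], [], [], []⟩ := by
    refine ⟨rfl, rfl, rfl, rfl, rfl, rfl, rfl, ?_, rfl⟩
    simp [renderB, map_const_range ([] : List String) line]
  have h := loopAB line.length line 0 _ _ h0
  obtain ⟨hts, hfns, hfis, hpis, honly, hol, hnl, htok, hidx⟩ := h
  simp only [Nat.zero_add] at hnl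
  rw [htok, honly, ← hidx, ← hnl]
  rw [List.range_eq_range']
  rw [finalA_eq (fun j =>
    renderB ((loopB 0 line ⟨[], [], [], [], [], []⟩).base.zip (loopB 0 line ⟨[], [], [], [], [], []⟩).owners) j)]
  simp
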